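/- GENERATED by farm/mkstatement.py from design/units.tsv (unit `start_decoder.C2`) and the assertions of Vorbis/Spec/StartDecoderA.lean — do not edit.
   THE STATEMENT of the proof unit `start_decoder.C2`: segment C2 of `start_decoder` (129 instructions; entries 0x114298;
   exits 0x113b22,0x1144ee,0x1147c3,0x1151bf; ranges 0x114298-0x114410 + 0x114439-0x1144e9)
   takes each of its entry assertions to one of its exit assertions (`Vorbis.Spec.StartDecoder.SegC2`), given the contracts of its callees.
   What the names mean: Vorbis/Spec/Basic.lean (the shared hypotheses), Vorbis/Spec/StartDecoderA.lean (the assertions). The theorem to prove: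
   `theorem start_decoder_C2_ok : Vorbis.Spec.start_decoder_C2.Statement`. -/
import Vorbis.Spec.Alloc
import Vorbis.Spec.Leaves
import Vorbis.Spec.Reader
import Vorbis.Spec.StartDecoderA
namespace Vorbis.Spec.start_decoder_C2
open X86 X86.User Asan

/-- The statement of unit `start_decoder.C2`. -/
def Statement : Prop :=
  ∀ (Lay : Layout) (_hLay : Lay.hi = 0x1000000) (μ : Microarch) (_hμ : UserX.MicroOK μ) (u₀ : State)
    (_hcode : HasCodeNat Lay u₀ Vorbis.L.start_decoder.entry Vorbis.Code.code_start_decoder.nat Vorbis.L.start_decoder.size)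
    (_h_asan_load4_noabort : Asan.SmallCheck Lay μ Vorbis.WayInv (Vorbis.CodeOK u₀) [.rax, .rcx, .rdx] 4 Vorbis.L.__asan_load4_noabort.entry)
    (_h_asan_load8_noabort : Asan.SmallCheck Lay μ Vorbis.WayInv (Vorbis.CodeOK u₀) [.rax, .rcx, .rdx] 8 Vorbis.L.__asan_load8_noabort.entry)
    (_h_get_bits : ∀ (others : List Obj) (frames : List (Nat × FrameLayout)) (Blk : Block → Prop) (len : Nat), Calls Lay μ Vorbis.WayInv (Vorbis.conv u₀) Vorbis.L.get_bits.entry (Vorbis.Spec.get_bits.spec others frames Blk len))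
    (_h_asan_store4_noabort : Asan.SmallCheck Lay μ Vorbis.WayInv (Vorbis.CodeOK u₀) [.rax, .rcx, .rdx] 4 Vorbis.L.__asan_store4_noabort.entry)
    (_h_asan_store1_noabort : Asan.SmallCheck Lay μ Vorbis.WayInv (Vorbis.CodeOK u₀) [.rax, .rdx] 1 Vorbis.L.__asan_store1_noabort.entry)
    (_h_setup_temp_malloc : ∀ (others : List Obj) (frames : List (Nat × FrameLayout)) (A : Arena), Calls Lay μ Vorbis.WayInv (Vorbis.conv u₀) Vorbis.L.setup_temp_malloc.entry (Vorbis.Spec.setup_temp_malloc.spec others frames A))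
    (_h_error : ∀ (others : List Obj) (frames : List (Nat × FrameLayout)), Calls Lay μ Vorbis.WayInv (Vorbis.conv u₀) Vorbis.L.error.entry (Vorbis.Spec.error.spec others frames))
    (_h_setup_malloc : ∀ (others : List Obj) (frames : List (Nat × FrameLayout)) (A : Arena), Calls Lay μ Vorbis.WayInv (Vorbis.conv u₀) Vorbis.L.setup_malloc.entry (Vorbis.Spec.setup_malloc.spec others frames A))
    (_h_asan_store8_noabort : Asan.SmallCheck Lay μ Vorbis.WayInv (Vorbis.CodeOK u₀) [.rax, .rcx, .rdx] 8 Vorbis.L.__asan_store8_noabort.entry),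
    Vorbis.Spec.StartDecoder.SegC2 Lay μ u₀

end Vorbis.Spec.start_decoder_C2
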